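-- pv_equiv track=rewrite | github.com/mossblaser/tiddlyserver | tiddlyserver/tiddler_embedding.py | get_title_and_subtitle
-- ===== SOURCE A (Python) =====
-- from typing import Iterable, Optional
--
-- def get_title_and_subtitle(tiddlers: Iterable[dict[str, str]]) -> tuple[Optional[str], Optional[str]]:
--     """
--     Get the wiki title and subtitles defined in the given set of tiddlers (if a
--     custom title/subtitle is defined).
--     """
--     title: Optional[str] = None
--     subtitle: Optional[str] = None
--     for tiddler in tiddlers:
--         if tiddler.get("title") == "$:/SiteTitle":
--             title = tiddler.get("text")
--         elif tiddler.get("title") == "$:/SiteSubtitle":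
--             subtitle = tiddler.get("text")
--
--     return (title, subtitle)
-- ===== SOURCE B (Python) =====
-- from typing import Iterable, Optional
--
-- def get_title_and_subtitle(tiddlers: "Iterable[dict[str, str]]") -> "tuple[Optional[str], Optional[str]]":
--     index = {t.get("title"): t.get("text") for t in tiddlers}
--     return (index.get("$:/SiteTitle"), index.get("$:/SiteSubtitle"))
-- ===== Notes on version B (the rewrite author's own statement) =====
-- stated objective: idiomatic
-- what changed: Replaces the per-element if/elif scan that mutates two accumulator variables with a single comprehension building a title->text index (last occurrence wins, matching A) followed by two dict lookups.
import Mathlib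
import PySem

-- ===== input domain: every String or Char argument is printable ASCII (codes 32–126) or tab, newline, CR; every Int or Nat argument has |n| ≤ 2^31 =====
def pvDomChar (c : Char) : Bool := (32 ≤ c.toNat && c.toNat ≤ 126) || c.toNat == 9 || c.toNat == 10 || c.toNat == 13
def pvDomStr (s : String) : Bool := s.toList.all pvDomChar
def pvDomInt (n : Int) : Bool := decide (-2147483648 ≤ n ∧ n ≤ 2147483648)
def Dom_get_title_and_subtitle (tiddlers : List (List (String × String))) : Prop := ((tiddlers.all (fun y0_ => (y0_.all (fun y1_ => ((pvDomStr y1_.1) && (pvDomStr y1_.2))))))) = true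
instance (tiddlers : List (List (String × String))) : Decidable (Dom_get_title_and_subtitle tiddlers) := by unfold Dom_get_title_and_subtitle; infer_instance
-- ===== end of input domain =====

-- B replaces A's per-element if/elif scan with a build-an-index-dict-then-lookup decomposition (idiomatic; same cost).


-- ===== PORT A =====
-- tiddler.get(k) on the association-list dict = first-match lookup (List.lookup)
def get_title_and_subtitle (tiddlers : List (List (String × String))) : Option String × Option String :=
  tiddlers.foldl (fun st tiddler =>
    if tiddler.lookup "title" = some "$:/SiteTitle" then (tiddler.lookup "text", st.2)
    else if tiddler.lookup "title" = some "$:/SiteSubtitle" then (st.1, tiddler.lookup "text")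
    else st) (none, none)

-- ===== PORT B =====
def get_title_and_subtitle_alt (tiddlers : List (List (String × String))) : Option String × Option String :=
  let index : PySem.Dict (Option String) (Option String) :=
    tiddlers.foldl (fun d t => d.insert (t.lookup "title") (t.lookup "text")) PySem.Dict.empty
  (index.getD (some "$:/SiteTitle") none, index.getD (some "$:/SiteSubtitle") none)

-- ===== PRECONDITION & SPEC =====
def Spec_get_title_and_subtitle (tiddlers : List (List (String × String))) (out : Option String × Option String) : Prop := out = get_title_and_subtitle_alt tiddlers
instance (tiddlers : List (List (String × String))) (out : Option String × Option String) : Decidable (Spec_get_title_and_subtitle tiddlers out) := by unfold Spec_get_title_and_subtitle; infer_instance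

-- ===== CLAIM (what is proved, stated in full; the proofs are below) =====
def Claim_equal_get_title_and_subtitle : Prop := ∀ (tiddlers : List (List (String × String))), Dom_get_title_and_subtitle tiddlers → Spec_get_title_and_subtitle tiddlers (get_title_and_subtitle tiddlers)

-- ===== LEMMAS AND PROOFS =====

-- Loop invariant: A's scan started from the two lookups in d equals the lookups in B's dict extended from d.
theorem gts_invariant (ts : List (List (String × String)))
    (d : PySem.Dict (Option String) (Option String)) :
    ts.foldl (fun st tiddler =>
      if tiddler.lookup "title" = some "$:/SiteTitle" then (tiddler.lookup "text", st.2)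
      else if tiddler.lookup "title" = some "$:/SiteSubtitle" then (st.1, tiddler.lookup "text")
      else st) (d.getD (some "$:/SiteTitle") none, d.getD (some "$:/SiteSubtitle") none)
    = ((ts.foldl (fun d t => d.insert (t.lookup "title") (t.lookup "text")) d).getD (some "$:/SiteTitle") none,
       (ts.foldl (fun d t => d.insert (t.lookup "title") (t.lookup "text")) d).getD (some "$:/SiteSubtitle") none) := by
  induction ts generalizing d with
  | nil => rfl
  | cons t ts ih =>
    simp only [List.foldl_cons]
    rw [← ih (d.insert (t.lookup "title") (t.lookup "text"))]
    congr 1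
    by_cases h1 : t.lookup "title" = some "$:/SiteTitle"
    · simp [h1, PySem.Dict.getD_insert]
    · by_cases h2 : t.lookup "title" = some "$:/SiteSubtitle"
      · simp [h2, PySem.Dict.getD_insert]
      · simp [h1, h2, PySem.Dict.getD_insert, Ne.symm h1, Ne.symm h2]

-- ===== VERDICT (by name: the statement is the Claim_ definition above) =====
theorem get_title_and_subtitle_spec : Claim_equal_get_title_and_subtitle := by
  intro tiddlers _
  show _ = _
  unfold get_title_and_subtitle get_title_and_subtitle_alt
  simpa using gts_invariant tiddlers PySem.Dict.empty
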